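-- pv_equiv track=rewrite | github.com/ethansaxenian/aoc2021 | day18b.py | find_explode
-- ===== SOURCE A (Python) =====
-- def find_explode(l):
--     depth = 0
--     for i, c in enumerate(l):
--         if c == "[":
--             depth += 1
--         if c == "]":
--             depth -= 1
--
--         if depth >= 5:
--             return i
--
--     return None
-- ===== SOURCE B (Python) =====
-- def find_explode(l):
--     deltas = [1 if c == "[" else -1 if c == "]" else 0 for c in l]
--     depths = []
--     total = 0
--     for d in deltas:
--         total += d
--         depths.append(total)
--     for i, d in enumerate(depths):
--         if d >= 5:
--             return i
--     return None
-- ===== Notes on version B (the rewrite author's own statement) =====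
-- stated objective: alternative
-- what changed: B separates the fused update-and-test loop into three passes: map each char to a depth delta, build the prefix-sum depth table, then search that table for the first entry >= 5.
import Mathlib
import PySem

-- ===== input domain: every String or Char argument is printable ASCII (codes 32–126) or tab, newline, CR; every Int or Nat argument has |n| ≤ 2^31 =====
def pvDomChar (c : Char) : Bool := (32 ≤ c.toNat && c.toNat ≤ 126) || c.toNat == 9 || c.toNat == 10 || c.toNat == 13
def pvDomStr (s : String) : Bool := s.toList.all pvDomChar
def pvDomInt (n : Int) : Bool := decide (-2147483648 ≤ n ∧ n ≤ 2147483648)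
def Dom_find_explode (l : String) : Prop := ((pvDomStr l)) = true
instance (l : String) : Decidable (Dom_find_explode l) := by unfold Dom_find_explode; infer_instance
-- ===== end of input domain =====

-- B rebuilds find_explode as three passes (delta map, prefix-sum depth table, search) instead of A's single fused loop; same O(n) cost.


-- ===== PORT A =====
-- A's loop: enumerate with running depth, update then test in the same iteration
def findExplodeGo : List Char → Int → Int → Option Int
  | [], _, _ => none
  | c :: rest, i, depth =>
    let d1 : Int := if c = '[' then depth + 1 else depth
    let d2 : Int := if c = ']' then d1 - 1 else d1
    if d2 ≥ 5 then some i else findExplodeGo rest (i + 1) d2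

def find_explode (l : String) : Option Int := findExplodeGo l.toList 0 0

-- ===== PORT B =====
def pvDeltas (cs : List Char) : List Int :=
  cs.map (fun c => if c = '[' then (1 : Int) else if c = ']' then -1 else 0)

def pvPrefixDepths : List Int → Int → List Int
  | [], _ => []
  | d :: rest, total => (total + d) :: pvPrefixDepths rest (total + d)

def pvSearchGe5 : List Int → Int → Option Int
  | [], _ => none
  | d :: rest, i => if d ≥ 5 then some i else pvSearchGe5 rest (i + 1)

def find_explode_alt (l : String) : Option Int :=
  pvSearchGe5 (pvPrefixDepths (pvDeltas l.toList) 0) 0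

-- ===== PRECONDITION & SPEC =====
def Spec_find_explode (l : String) (out : Option Int) : Prop := out = find_explode_alt l
instance (l : String) (out : Option Int) : Decidable (Spec_find_explode l out) := by unfold Spec_find_explode; infer_instance

-- ===== CLAIM (what is proved, stated in full; the proofs are below) =====
def Claim_equal_find_explode : Prop := ∀ (l : String), Dom_find_explode l → Spec_find_explode l (find_explode l)

-- ===== LEMMAS AND PROOFS =====
theorem findExplodeGo_eq (cs : List Char) :
    ∀ (i depth : Int), findExplodeGo cs i depth = pvSearchGe5 (pvPrefixDepths (pvDeltas cs) depth) i := by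
  induction cs with
  | nil => intro i depth; rfl
  | cons c rest ih =>
    intro i depth
    simp only [findExplodeGo, pvDeltas, List.map, pvPrefixDepths, pvSearchGe5]
    by_cases h1 : c = '['
    · by_cases h2 : c = ']'
      · simp [h1] at h2
      · simp [pvDeltas, h1, h2, ih]
    · by_cases h2 : c = ']'
      · simp [pvDeltas, h1, h2, ih, sub_eq_add_neg]
      · simp [pvDeltas, h1, h2, ih]

-- ===== VERDICT (by name: the statement is the Claim_ definition above) =====
theorem find_explode_spec : Claim_equal_find_explode := by
  intro l _
  unfold Spec_find_explode find_explode find_explode_alt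
  exact findExplodeGo_eq l.toList 0 0
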